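-- pv_equiv track=rewrite | github.com/ZeroPie/ATS | P1/P1.py | ueberschneidungLoeschen
-- ===== SOURCE A (Python) =====
-- import math
--
-- def ueberschneidungLoeschen(winkel):
--     '''Loescht Landmarks die sich ueberschneiden
--     Das LM das weiter entfernt ist, wird behalten
--     winkel - Tupel mit LM-Daten (Aufbau s. lmWinkel)
--     '''
--     winkel = sorted(winkel)
--     i = 0
--     wSize = len(winkel)
--     r = lambda x: (x+1)%wSize
--     while i < wSize and wSize > 1:
--         wDif = winkel[r(i)][2] - winkel[i][1]
--         grenze = winkel[r(i)][3] + winkel[i][3]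
--         if wDif < 0 and math.fabs(wDif) < grenze:
--             if winkel[i][3] > winkel[r(i)][3]:
--                 del winkel[i]
--             else:
--                 del winkel[r(i)]
--             wSize = wSize - 1
--         else:
--             i = i + 1
--     return tuple(winkel)
-- ===== SOURCE B (Python) =====
-- def ueberschneidungLoeschen(winkel):
--     '''Single forward sweep over the sorted list with an accumulator (no index
--     juggling / in-place deletion), then one circular last-vs-first fixup.'''
--     ws = sorted(winkel)
--     if not ws:
--         return ()
--     out = []
--     cur = ws[0]
--     for nxt in ws[1:]:
--         wDif = nxt[2] - cur[1]
--         if wDif < 0 and -wDif < nxt[3] + cur[3]: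
--             if cur[3] > nxt[3]:
--                 cur = nxt
--             # else: nxt is dropped, cur stays
--         else:
--             out.append(cur)
--             cur = nxt
--     out.append(cur)
--     if len(out) > 1:
--         wDif = out[0][2] - out[-1][1]
--         if wDif < 0 and -wDif < out[0][3] + out[-1][3]:
--             if out[-1][3] > out[0][3]:
--                 out.pop()
--             else:
--                 out.pop(0)
--     return tuple(out)
-- ===== Notes on version B (the rewrite author's own statement) =====
-- stated objective: simpler
-- what changed: Replaces A's index-juggling while loop with in-place deletions and a modular neighbour index by a single forward accumulator sweep over the sorted list followed by one explicit circular last-vs-first fixup, exploiting that A's index never moves backwards.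
import Mathlib
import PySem

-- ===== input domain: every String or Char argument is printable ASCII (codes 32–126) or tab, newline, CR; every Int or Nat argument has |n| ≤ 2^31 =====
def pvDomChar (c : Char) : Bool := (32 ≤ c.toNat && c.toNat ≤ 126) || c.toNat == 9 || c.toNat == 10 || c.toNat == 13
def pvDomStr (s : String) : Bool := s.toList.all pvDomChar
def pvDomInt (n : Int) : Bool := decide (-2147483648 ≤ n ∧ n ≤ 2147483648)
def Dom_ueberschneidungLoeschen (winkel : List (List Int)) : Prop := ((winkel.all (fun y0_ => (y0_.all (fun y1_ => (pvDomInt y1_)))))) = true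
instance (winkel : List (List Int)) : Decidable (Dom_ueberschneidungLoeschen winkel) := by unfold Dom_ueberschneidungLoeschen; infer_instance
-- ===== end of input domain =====

-- B replaces A's index-and-delete while loop by a single accumulator sweep over the
-- sorted list plus one circular last-vs-first fixup (objective: simpler; A mutates its
-- local copy only, callers observe the return value alone).

-- ===== PORT A =====
-- A's while loop with in-place deletion; i is the index, r(i) = (i+1) % wSize.
-- winkel[j][k] is ported via getD (total) — exact under Pre_ (inner lists have ≥ 4
-- fields, so Python never raises; the outer index is always in range, the indices are
-- nonnegative literals, and math.fabs(wDif) < grenze is exactly -wDif < grenze on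
-- these ints since |n| ≤ 2^31 in Dom_).
def pvALoop (winkel : List (List Int)) (i : Nat) : List (List Int) :=
  if h : i < winkel.length ∧ 1 < winkel.length then
    if (winkel.getD ((i + 1) % winkel.length) []).getD 2 0 - (winkel.getD i []).getD 1 0 < 0 ∧
        -((winkel.getD ((i + 1) % winkel.length) []).getD 2 0 - (winkel.getD i []).getD 1 0) <
          (winkel.getD ((i + 1) % winkel.length) []).getD 3 0 + (winkel.getD i []).getD 3 0 then
      if (winkel.getD i []).getD 3 0 > (winkel.getD ((i + 1) % winkel.length) []).getD 3 0 then
        pvALoop (winkel.eraseIdx i) i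
      else
        pvALoop (winkel.eraseIdx ((i + 1) % winkel.length)) i
    else
      pvALoop winkel (i + 1)
  else winkel
termination_by 2 * winkel.length - i
decreasing_by
  · have h1 : (winkel.eraseIdx i).length = winkel.length - 1 :=
      List.length_eraseIdx_of_lt h.1
    omega
  · have hri : (i + 1) % winkel.length < winkel.length := Nat.mod_lt _ (by omega)
    have h1 : (winkel.eraseIdx ((i + 1) % winkel.length)).length = winkel.length - 1 :=
      List.length_eraseIdx_of_lt hri
    omega
  · omega

def ueberschneidungLoeschen (winkel : List (List Int)) : List (List Int) :=
  pvALoop (PySem.List.sorted winkel (fun x => x) false) 0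

-- ===== PORT B =====
-- the for loop of Source B: cur vs next element, out is the accumulator (out.append = ++ [cur])
def pvBSweep (cur : List Int) (rest : List (List Int)) (out : List (List Int)) : List (List Int) :=
  match rest with
  | [] => out ++ [cur]
  | nxt :: rest' =>
    if nxt.getD 2 0 - cur.getD 1 0 < 0 ∧
        -(nxt.getD 2 0 - cur.getD 1 0) < nxt.getD 3 0 + cur.getD 3 0 then
      if cur.getD 3 0 > nxt.getD 3 0 then pvBSweep nxt rest' out
      else pvBSweep cur rest' out
    else pvBSweep nxt rest' (out ++ [cur])

-- the final 'if len(out) > 1' circular fixup of Source B (out.pop() / out.pop(0))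
def pvBWrap (out : List (List Int)) : List (List Int) :=
  if 1 < out.length then
    if (out.getD 0 []).getD 2 0 - (out.getLast?.getD []).getD 1 0 < 0 ∧
        -((out.getD 0 []).getD 2 0 - (out.getLast?.getD []).getD 1 0) <
          (out.getD 0 []).getD 3 0 + (out.getLast?.getD []).getD 3 0 then
      if (out.getLast?.getD []).getD 3 0 > (out.getD 0 []).getD 3 0 then out.dropLast
      else out.tail
    else out
  else out

def ueberschneidungLoeschen_alt (winkel : List (List Int)) : List (List Int) :=
  match PySem.List.sorted winkel (fun x => x) false with
  | [] => []
  | x :: xs => pvBWrap (pvBSweep x xs [])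

-- ===== PRECONDITION & SPEC =====
-- Pre_ excludes exactly the inputs where Python A raises an IndexError: a list with at
-- least two landmarks one of which has fewer than 4 fields (with ≤ 1 elements the loop
-- body never runs, so short entries are fine there).
def Pre_ueberschneidungLoeschen (winkel : List (List Int)) : Prop :=
  winkel.length ≤ 1 ∨ ∀ x ∈ winkel, 4 ≤ x.length
instance (winkel : List (List Int)) : Decidable (Pre_ueberschneidungLoeschen winkel) := by
  unfold Pre_ueberschneidungLoeschen; infer_instance

def pvWitness_ueberschneidungLoeschen : List (List Int) := [[0, 3, 0, 1], [1, 5, 2, 1]]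

def Spec_ueberschneidungLoeschen (winkel : List (List Int)) (out : List (List Int)) : Prop := out = ueberschneidungLoeschen_alt winkel
instance (winkel : List (List Int)) (out : List (List Int)) : Decidable (Spec_ueberschneidungLoeschen winkel out) := by unfold Spec_ueberschneidungLoeschen; infer_instance

-- ===== CLAIM (what is proved, stated in full; the proofs are below) =====
def Claim_equal_ueberschneidungLoeschen : Prop := ∀ (winkel : List (List Int)), Dom_ueberschneidungLoeschen winkel → Pre_ueberschneidungLoeschen winkel → Spec_ueberschneidungLoeschen winkel (ueberschneidungLoeschen winkel)

-- ===== LEMMAS AND PROOFS =====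

theorem pv_getD_append_mid (pre l : List (List Int)) (x : List Int) :
    (pre ++ x :: l).getD pre.length [] = x := by
  simp [List.getD_eq_getElem?_getD]

theorem pv_getD_append_mid_succ (pre l : List (List Int)) (x y : List Int) :
    (pre ++ x :: y :: l).getD (pre.length + 1) [] = y := by
  have : pre ++ x :: y :: l = (pre ++ [x]) ++ y :: l := by simp
  rw [this]
  have hl : pre.length + 1 = (pre ++ [x]).length := by simp
  rw [hl, pv_getD_append_mid]

theorem pv_eraseIdx_append_mid (pre l : List (List Int)) (x : List Int) :
    (pre ++ x :: l).eraseIdx pre.length = pre ++ l := by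
  induction pre with
  | nil => rfl
  | cons p ps ih => simp [ih]

theorem pvALoop_exit (w : List (List Int)) (i : Nat) (h : ¬ (i < w.length ∧ 1 < w.length)) :
    pvALoop w i = w := by
  rw [pvALoop]; simp [h]

-- A's sweep with "finished" prefix pre, current element cur, remaining rest,
-- equals B's accumulator sweep followed by the circular fixup.
theorem pv_key (rest : List (List Int)) : ∀ (pre : List (List Int)) (cur : List Int),
    pvALoop (pre ++ cur :: rest) pre.length = pvBWrap (pvBSweep cur rest pre) := by
  induction rest with
  | nil =>
    intro pre cur
    show pvALoop (pre ++ [cur]) pre.length = pvBWrap (pre ++ [cur])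
    by_cases hp : pre = []
    · subst hp
      rw [pvALoop_exit _ _ (by simp), pvBWrap]
      simp
    · have hplen : 0 < pre.length := List.length_pos_of_ne_nil hp
      rw [pvALoop]
      have hcond : pre.length < (pre ++ [cur]).length ∧ 1 < (pre ++ [cur]).length := by
        simp; omega
      rw [dif_pos hcond]
      have hri : (pre.length + 1) % (pre ++ [cur]).length = 0 := by
        have h2 : (pre ++ [cur]).length = pre.length + 1 := by simp
        rw [h2, Nat.mod_self]
      rw [hri]
      have hi : (pre ++ [cur]).getD pre.length [] = cur := pv_getD_append_mid pre [] cur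
      rw [hi]
      rw [pvBWrap, if_pos hcond.2]
      have hlast : (pre ++ [cur]).getLast?.getD [] = cur := by simp
      have h0 : (pre ++ [cur]).getD 0 [] = pre.getD 0 [] := by
        rcases pre with _ | ⟨p, ps⟩
        · exact absurd rfl hp
        · rfl
      rw [hlast, h0]
      have h0' : ((pre ++ [cur]).getD 0 []) = pre.getD 0 [] := h0
      by_cases hc : (pre.getD 0 []).getD 2 0 - cur.getD 1 0 < 0 ∧
          -((pre.getD 0 []).getD 2 0 - cur.getD 1 0) < (pre.getD 0 []).getD 3 0 + cur.getD 3 0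
      · rw [if_pos hc, if_pos hc]
        by_cases hd : cur.getD 3 0 > (pre.getD 0 []).getD 3 0
        · rw [if_pos hd, if_pos hd]
          have herase : (pre ++ [cur]).eraseIdx pre.length = pre ++ [] :=
            pv_eraseIdx_append_mid pre [] cur
          rw [herase, pvALoop_exit _ _ (by simp)]
          simp
        · rw [if_neg hd, if_neg hd]
          rw [List.eraseIdx_zero, pvALoop_exit _ _ (by simp)]
      · rw [if_neg hc, if_neg hc]
        rw [pvALoop_exit _ _ (by simp)]
  | cons nxt rest' ih =>
    intro pre cur
    rw [pvALoop]
    have hcond : pre.length < (pre ++ cur :: nxt :: rest').length ∧ 1 < (pre ++ cur :: nxt :: rest').length := by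
      simp; omega
    rw [dif_pos hcond]
    have hri : (pre.length + 1) % (pre ++ cur :: nxt :: rest').length = pre.length + 1 :=
      Nat.mod_eq_of_lt (by simp)
    rw [hri, pv_getD_append_mid pre (nxt :: rest') cur, pv_getD_append_mid_succ pre rest' cur nxt]
    rw [pvBSweep]
    by_cases hc : nxt.getD 2 0 - cur.getD 1 0 < 0 ∧ -(nxt.getD 2 0 - cur.getD 1 0) < nxt.getD 3 0 + cur.getD 3 0
    · rw [if_pos hc, if_pos hc]
      by_cases hd : cur.getD 3 0 > nxt.getD 3 0
      · rw [if_pos hd, if_pos hd]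
        rw [pv_eraseIdx_append_mid pre (nxt :: rest') cur]
        exact ih pre nxt
      · rw [if_neg hd, if_neg hd]
        have herase : (pre ++ cur :: nxt :: rest').eraseIdx (pre.length + 1) = pre ++ cur :: rest' := by
          have h2 : pre ++ cur :: nxt :: rest' = (pre ++ [cur]) ++ nxt :: rest' := by simp
          have hl : pre.length + 1 = (pre ++ [cur]).length := by simp
          rw [h2, hl, pv_eraseIdx_append_mid (pre ++ [cur]) rest' nxt]
          simp
        rw [herase]
        exact ih pre cur
    · rw [if_neg hc, if_neg hc]
      have h2 : pre ++ cur :: nxt :: rest' = (pre ++ [cur]) ++ nxt :: rest' := by simp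
      have hl : pre.length + 1 = (pre ++ [cur]).length := by simp
      rw [h2, hl]
      exact ih (pre ++ [cur]) nxt

-- ===== VERDICT (by name: the statement is the Claim_ definition above) =====
theorem ueberschneidungLoeschen_spec : Claim_equal_ueberschneidungLoeschen := by
  intro winkel _ _
  unfold Spec_ueberschneidungLoeschen ueberschneidungLoeschen ueberschneidungLoeschen_alt
  cases h : PySem.List.sorted winkel (fun x => x) false with
  | nil => rw [pvALoop_exit _ _ (by simp)]
  | cons x xs =>
    have := pv_key xs [] x
    simpa using this
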